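-- pv_equiv track=rewrite | github.com/ufownl/reinforcement_learning | tabular_td0_prediction_a.py | mc_evaluate
-- ===== SOURCE A (Python) =====
-- class State:
--     states = [
--         ("leaving office, friday at 6", 0, 30),
--         ("reach car, raining", 5, 35),
--         ("exiting hightway", 20, 15),
--         ("2ndary road, behind truck", 30, 10),
--         ("entering home street", 40, 3),
--         ("arrive home", 43, 0)
--     ]
--
--     def __init__(self, idx=0):
--         if idx < 0 or idx >= len(self.states):
--             raise IndexError("Invalid state")
--         self.__index = idx
--
--     @property
--     def index(self):
--         return self.__index
--
--     def transition(self):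
--         idx = self.__index + 1
--         return State(idx) if idx < len(self.states) - 1 else None, self.states[idx][1] - self.states[self.__index][1]
--
-- def mc_evaluate(episodes, values):
--     for _ in range(episodes):
--         episode = [(State(), None)]
--         while True:
--             s, _ = episode[-1]
--             if s is None:
--                 break
--             episode.append(s.transition())
--         g = 0
--         for t in reversed(range(len(episode) - 1)):
--             g += episode[t + 1][1]
--             s, _ = episode[t]
--             values[s.index] += g - values[s.index]
--     return values
-- ===== SOURCE B (Python) =====
-- # The episode is deterministic, so the per-state returns are computed once by a
-- # single backward suffix-sum over the fixed reward chain; if episodes > 0 they are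
-- # written into values (mutating it in place, as A does) -- O(1) in episodes.
-- states = [
--     ("leaving office, friday at 6", 0, 30),
--     ("reach car, raining", 5, 35),
--     ("exiting hightway", 20, 15),
--     ("2ndary road, behind truck", 30, 10),
--     ("entering home street", 40, 3),
--     ("arrive home", 43, 0)
-- ]
--
-- def mc_evaluate(episodes, values):
--     if episodes > 0:
--         n = len(states) - 1
--         returns = [0] * n
--         g = 0
--         for t in range(n - 1, -1, -1):
--             g += states[t + 1][1] - states[t][1]
--             returns[t] = g
--         values[:n] = returns
--     return values
-- ===== Notes on version B (the rewrite author's own statement) =====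
-- stated objective: faster
-- what changed: A re-simulates the same deterministic episode for every iteration of the episodes loop; B computes the per-state returns once by a backward suffix-sum over the fixed reward chain and writes them into values if episodes > 0, since every episode is identical and the update is idempotent.
import Mathlib
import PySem

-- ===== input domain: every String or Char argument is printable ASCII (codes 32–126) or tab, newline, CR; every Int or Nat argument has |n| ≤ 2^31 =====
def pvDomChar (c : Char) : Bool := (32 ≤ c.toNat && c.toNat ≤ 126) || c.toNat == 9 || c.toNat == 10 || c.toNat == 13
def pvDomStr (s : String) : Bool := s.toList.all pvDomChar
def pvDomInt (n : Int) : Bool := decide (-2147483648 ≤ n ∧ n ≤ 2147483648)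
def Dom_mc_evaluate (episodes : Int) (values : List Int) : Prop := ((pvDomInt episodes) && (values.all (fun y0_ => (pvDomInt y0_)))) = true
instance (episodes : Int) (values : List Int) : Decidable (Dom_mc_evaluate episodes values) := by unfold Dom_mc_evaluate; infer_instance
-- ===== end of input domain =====

-- B replaces A's per-episode re-simulation of the one deterministic episode by a single
-- backward suffix-sum of the fixed reward chain, applied once when episodes > 0 (faster).
-- Both A and B mutate `values` in place in Python; the equivalence proved here is about
-- the RETURN value (which is the mutated list in both).

-- ===== PORT A =====
-- the State.states class table (name, value, time-to-go)
def pvStates : List (String × Int × Int) := [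
  ("leaving office, friday at 6", 0, 30),
  ("reach car, raining", 5, 35),
  ("exiting hightway", 20, 15),
  ("2ndary road, behind truck", 30, 10),
  ("entering home street", 40, 3),
  ("arrive home", 43, 0)]

-- states[i][1] (indices used by A are always in range, so getD 0 is never taken)
def pvStateVal (i : Int) : Int := ((PySem.List.pyGet? pvStates i).map (fun t => t.2.1)).getD 0

-- State.transition: (next state index or None, reward)
def pvTransition (i : Int) : Option Int × Int :=
  let idx := i + 1
  ((if idx < (pvStates.length : Int) - 1 then some idx else none), pvStateVal idx - pvStateVal i)

-- the `while True` episode-building loop; fuel only makes the recursion total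
-- (the state index strictly increases, so fuel pvStates.length is never exhausted)
def pvEpisodeLoop (ep : List (Option Int × Option Int)) : Nat → List (Option Int × Option Int)
  | 0 => ep
  | fuel + 1 =>
    match ep.getLast? with
    | some (some s, _) =>
        let t := pvTransition s
        pvEpisodeLoop (ep ++ [(t.1, some t.2)]) fuel
    | _ => ep

-- body of `for t in reversed(range(len(episode) - 1))`, state (g, values)
def pvEpStep (episode : List (Option Int × Option Int)) (st : Int × List Int) (t : Nat) :
    Int × List Int :=
  let g := st.1 + ((episode.getD (t + 1) (none, none)).2.getD 0)
  match (episode.getD t (none, none)).1 with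
  | some s =>
      let old := (PySem.List.pyGet? st.2 s).getD 0    -- values[s.index]; in range under Pre_
      (g, PySem.List.pySetD st.2 s (old + (g - old)))
  | none => (g, st.2)

-- one iteration of A's outer `for _ in range(episodes)` loop
def pvOneEpisode (values : List Int) : List Int :=
  let episode := pvEpisodeLoop [(some 0, none)] pvStates.length
  ((List.range (episode.length - 1)).reverse.foldl (pvEpStep episode) (0, values)).2

def mc_evaluate (episodes : Int) (values : List Int) : List Int :=
  (List.range episodes.toNat).foldl (fun vals _ => pvOneEpisode vals) values

-- ===== PORT B =====
-- Source B's backward suffix-sum over the reward chain: returns[t] = g after the loop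
def pvReturnsLoop (returns : List Int) (g : Int) : List Int :=
  ((List.range (pvStates.length - 1)).reverse.foldl
    (fun (st : List Int × Int) t =>
      let g := st.2 + (pvStateVal (t + 1) - pvStateVal t)
      (PySem.List.pySetD st.1 t g, g))
    (returns, g)).1

def mc_evaluate_alt (episodes : Int) (values : List Int) : List Int :=
  if episodes > 0 then
    let n := pvStates.length - 1
    let returns := pvReturnsLoop (List.replicate n 0) 0
    returns ++ values.drop n   -- values[:n] = returns
  else values

-- ===== PRECONDITION & SPEC =====
-- Pre_ excludes exactly the inputs where A raises IndexError: episodes > 0 with fewer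
-- than 5 entries in values (A reads values[s.index] for indices 0..4 each episode).
def Pre_mc_evaluate (episodes : Int) (values : List Int) : Prop :=
  episodes ≤ 0 ∨ 5 ≤ values.length
instance (episodes : Int) (values : List Int) : Decidable (Pre_mc_evaluate episodes values) := by
  unfold Pre_mc_evaluate; infer_instance

def pvWitness_mc_evaluate : Int × List Int := (3, [0, 0, 0, 0, 0, 0])

def Spec_mc_evaluate (episodes : Int) (values : List Int) (out : List Int) : Prop :=
  out = mc_evaluate_alt episodes values
instance (episodes : Int) (values : List Int) (out : List Int) :
    Decidable (Spec_mc_evaluate episodes values out) := by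
  unfold Spec_mc_evaluate; infer_instance

-- ===== CLAIM (what is proved, stated in full; the proofs are below) =====
def Claim_equal_mc_evaluate : Prop :=
  ∀ (episodes : Int) (values : List Int), Dom_mc_evaluate episodes values →
    Pre_mc_evaluate episodes values →
    Spec_mc_evaluate episodes values (mc_evaluate episodes values)

-- ===== LEMMAS AND PROOFS =====

-- the fixed point both programs reach on lists with at least five entries
def pvTarget (values : List Int) : List Int := [43, 38, 23, 13, 3] ++ values.drop 5

theorem pvOneEpisode_eq (v0 v1 v2 v3 v4 : Int) (rest : List Int) :
    pvOneEpisode (v0 :: v1 :: v2 :: v3 :: v4 :: rest) =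
      pvTarget (v0 :: v1 :: v2 :: v3 :: v4 :: rest) := by
  simp [pvOneEpisode, pvEpisodeLoop, pvEpStep, pvTransition, pvStateVal, pvStates,
    pvTarget, List.range_succ, PySem.List.pySetD_of_nonneg,
    PySem.List.pyGet?, PySem.List.pyIdx?]

theorem pvAlt_eq (episodes : Int) (values : List Int) (h : 0 < episodes) :
    mc_evaluate_alt episodes values = pvTarget values := by
  have hr : pvReturnsLoop (List.replicate (pvStates.length - 1) 0) 0 = [43, 38, 23, 13, 3] := by
    decide
  simp only [mc_evaluate_alt, if_pos h]
  rw [hr]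
  simp [pvTarget, pvStates]

theorem pvIter_eq (k : Nat) (values : List Int) (h : 5 ≤ values.length) :
    (List.range (k + 1)).foldl (fun vals _ => pvOneEpisode vals) values = pvTarget values := by
  induction k with
  | zero =>
      obtain ⟨v0, v1, v2, v3, v4, rest, rfl⟩ :
          ∃ v0 v1 v2 v3 v4 rest, values = v0 :: v1 :: v2 :: v3 :: v4 :: rest := by
        match values, h with
        | v0 :: v1 :: v2 :: v3 :: v4 :: rest, _ => exact ⟨v0, v1, v2, v3, v4, rest, rfl⟩
      simpa [List.range_succ] using pvOneEpisode_eq v0 v1 v2 v3 v4 rest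
  | succ k ih =>
      rw [List.range_succ, List.foldl_append, ih]
      simp only [List.foldl_cons, List.foldl_nil, pvTarget]
      exact pvOneEpisode_eq _ _ _ _ _ _

-- ===== VERDICT (by name: the statement is the Claim_ definition above) =====
theorem mc_evaluate_spec : Claim_equal_mc_evaluate := by
  intro episodes values _ hpre
  unfold Spec_mc_evaluate mc_evaluate
  by_cases hpos : 0 < episodes
  · have hlen : 5 ≤ values.length := by
      rcases hpre with h | h
      · omega
      · exact h
    have hk : ∃ k : Nat, episodes.toNat = k + 1 := by
      refine ⟨episodes.toNat - 1, ?_⟩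
      omega
    obtain ⟨k, hk⟩ := hk
    rw [hk, pvIter_eq k values hlen, pvAlt_eq episodes values hpos]
  · have : episodes.toNat = 0 := by omega
    simp [this, mc_evaluate_alt, hpos]
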